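-- pv_equiv track=rewrite | github.com/kamiderka/WDI-2024 | Zestaw 1 - Proste programy z pętlami/zad048.py | ascending_digits_prime
-- ===== SOURCE A (Python) =====
-- def sum_digits(n :int)->int:
--     result=0
--     prev = 10
--     while n>0:
--         curr = n%10
--         if prev <= curr:
--             return -1
--         prev = curr
--         result+=curr
--         n//=10
--     return result
--
-- def is_prime(n :int)->bool:
--     if n < 2:
--         return False
--     if n == 2 or n == 3:
--         return True
--     if n%2==0 or n%3==0:
--         return False
--
--     i = 3
--     while i*i <= n:
--         if n%i == 0:
--             return False
--         i+=2
--
--         if n%i==0: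
--             return False
--         i+=4
--     return True
--
-- def ascending_digits_prime(n :int, border=10e50)->int:
--     min_digits = n//9
--     min_number = 10**min_digits
--
--     for i in range(min_number, 123456789+1):
--         if n%2!=0 or n%3!=0:
--             if sum_digits(i) == n:
--                 if is_prime(i):
--                     return i
--     return None
-- ===== SOURCE B (Python) =====
-- def is_prime(n :int)->bool:
--     if n < 2:
--         return False
--     if n == 2 or n == 3:
--         return True
--     if n%2==0 or n%3==0:
--         return False
--
--     i = 3
--     while i*i <= n:
--         if n%i == 0:
--             return False
--         i+=2
--
--         if n%i==0:
--             return False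
--         i+=4
--     return True
--
-- def ascending_digits_prime(n :int, border=10e50)->int:
--     # Every number with strictly ascending digits is a nonempty subset of
--     # {1..9} written in increasing order: enumerate the 511 subsets as masks,
--     # keep those whose digit sum is n, return the smallest one passing the
--     # module's primality test.
--     candidates = []
--     for mask in range(1, 512):
--         s = 0
--         num = 0
--         for d in range(1, 10):
--             if (mask // 2 ** (d - 1)) % 2 == 1:
--                 s += d
--                 num = num * 10 + d
--         if s == n:
--             candidates.append(num)
--     for num in sorted(candidates):
--         if is_prime(num):
--             return num
--     return None
-- ===== Notes on version B (the rewrite author's own statement) =====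
-- stated objective: alternative
-- what changed: Instead of scanning every integer from A's lower search bound up to its fixed nine-digit upper bound and computing each digit sum, B enumerates the nonempty subsets of the digits 1..9 (each subset written in increasing order is exactly one strictly-ascending-digit number), keeps those with digit sum n, and returns the smallest that passes the module's primality test.
-- outside the precondition, e.g. on ascending_digits_prime(-1): A raises TypeError, B returns None
import Mathlib
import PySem

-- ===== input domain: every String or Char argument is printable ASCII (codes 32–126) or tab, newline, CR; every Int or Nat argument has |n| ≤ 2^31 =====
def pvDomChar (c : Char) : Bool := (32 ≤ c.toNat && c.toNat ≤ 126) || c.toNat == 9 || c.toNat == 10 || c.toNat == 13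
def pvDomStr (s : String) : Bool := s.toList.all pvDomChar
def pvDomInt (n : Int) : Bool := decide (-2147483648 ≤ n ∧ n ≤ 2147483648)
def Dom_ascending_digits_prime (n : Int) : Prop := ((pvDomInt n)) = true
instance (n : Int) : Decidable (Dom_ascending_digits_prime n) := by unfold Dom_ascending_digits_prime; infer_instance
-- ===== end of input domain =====

-- B replaces A's scan of every integer between its two search bounds by an enumeration of
-- the nonempty digit subsets of {1..9}; same return value, different algorithm.

-- ===== PORT A =====
-- `while n>0` loop of sum_digits; the fuel only bounds the trip count (n shrinks via //10
-- each pass, so n.toNat+1 always suffices) and does not change the computation.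
def pySumDigitsGo (fuel : Nat) (prev result n : Int) : Int :=
  match fuel with
  | 0 => result
  | fuel + 1 =>
    if 0 < n then
      let curr := PySem.Int.mod n 10
      if prev ≤ curr then -1
      else pySumDigitsGo fuel curr (result + curr) (PySem.Int.floordiv n 10)
    else result

def sum_digits (n : Int) : Int := pySumDigitsGo (n.toNat + 1) 10 0 n

-- `while i*i <= n` wheel of is_prime; fuel n.toNat+1 dominates the trip count (i grows by 6).
def pyIsPrimeGo (fuel : Nat) (n i : Int) : Bool :=
  match fuel with
  | 0 => true
  | fuel + 1 =>
    if i * i ≤ n then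
      if PySem.Int.mod n i = 0 then false
      else if PySem.Int.mod n (i + 2) = 0 then false
      else pyIsPrimeGo fuel n (i + 6)
    else true

def is_prime (n : Int) : Bool :=
  if n < 2 then false
  else if n = 2 ∨ n = 3 then true
  else if PySem.Int.mod n 2 = 0 ∨ PySem.Int.mod n 3 = 0 then false
  else pyIsPrimeGo (n.toNat + 1) n 3

-- `for i in range(min_number, 123456789+1)` with early return; fuel = the trip count.
def aLoop (n : Int) (fuel : Nat) (i : Int) : Option Int :=
  match fuel with
  | 0 => none
  | fuel + 1 =>
    if ¬ PySem.Int.mod n 2 = 0 ∨ ¬ PySem.Int.mod n 3 = 0 then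
      if sum_digits i = n then
        if is_prime i then some i
        else aLoop n fuel (i + 1)
      else aLoop n fuel (i + 1)
    else aLoop n fuel (i + 1)

-- 10 ** min_digits ported with a toNat exponent: exact for n ≥ 0 (Pre_); for n < 0 Python's
-- 10**min_digits is a float and range() raises TypeError, so those inputs are outside Pre_.
def ascending_digits_prime (n : Int) : Option Int :=
  let min_digits := PySem.Int.floordiv n 9
  let min_number : Int := 10 ^ min_digits.toNat
  aLoop n ((123456789 + 1) - min_number).toNat min_number

-- ===== PORT B =====
-- inner `for d in range(1, 10)` of Source B accumulating (s, num); 2 ** (d - 1) has d ≥ 1 on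
-- this range, so the toNat exponent is exact.
def bInner (mask : Int) : Int × Int :=
  (PySem.List.pyRange 1 10 1).foldl
    (fun sn d =>
      if PySem.Int.mod (PySem.Int.floordiv mask (2 ^ (d - 1).toNat)) 2 = 1 then
        (sn.1 + d, sn.2 * 10 + d)
      else sn)
    (0, 0)

-- `for mask in range(1, 512)` building candidates
def bCands (n : Int) : List Int :=
  (PySem.List.pyRange 1 512 1).foldl
    (fun acc mask => if (bInner mask).1 = n then acc ++ [(bInner mask).2] else acc)
    []

-- `for num in sorted(candidates)` with early return
def bFind : List Int → Option Int
  | [] => none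
  | x :: xs => if is_prime x then some x else bFind xs

def ascending_digits_prime_alt (n : Int) : Option Int :=
  bFind (PySem.List.sorted (bCands n) (fun x => x) false)

-- ===== PRECONDITION & SPEC =====
-- Pre_ excludes only n < 0, where Python A raises TypeError (10**negative is a float, which
-- range() rejects); A returns normally on every n ≥ 0.
def Pre_ascending_digits_prime (n : Int) : Prop := 0 ≤ n
instance (n : Int) : Decidable (Pre_ascending_digits_prime n) := by
  unfold Pre_ascending_digits_prime; infer_instance

def pvWitness_ascending_digits_prime : Int := 5

def Spec_ascending_digits_prime (n : Int) (out : Option Int) : Prop :=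
  out = ascending_digits_prime_alt n
instance (n : Int) (out : Option Int) : Decidable (Spec_ascending_digits_prime n out) := by
  unfold Spec_ascending_digits_prime; infer_instance

-- ===== CLAIM (what is proved, stated in full; the proofs are below) =====
def Claim_equal_ascending_digits_prime : Prop :=
  ∀ (n : Int), Dom_ascending_digits_prime n → Pre_ascending_digits_prime n →
    Spec_ascending_digits_prime n (ascending_digits_prime n)

-- ===== LEMMAS AND PROOFS =====

-- the predicate A's scan applies to each i
def pA (n i : Int) : Bool :=
  (decide (¬ PySem.Int.mod n 2 = 0 ∨ ¬ PySem.Int.mod n 3 = 0))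
    && (sum_digits i == n) && is_prime i

-- A's lower search bound
def aLo (n : Int) : Int := 10 ^ ((PySem.Int.floordiv n 9).toNat)

lemma bFind_eq (xs : List Int) : bFind xs = (xs.filter (fun x => is_prime x)).head? := by
  induction xs with
  | nil => rfl
  | cons x xs ih => by_cases h : is_prime x <;> simp [bFind, List.filter, h, ih]

lemma pA_guard_false (n i : Int) (hg : ¬ (¬ PySem.Int.mod n 2 = 0 ∨ ¬ PySem.Int.mod n 3 = 0)) :
    pA n i = false := by
  simp only [pA, decide_eq_false hg, Bool.false_and]

lemma aLoop_eq (n : Int) : ∀ (f : Nat) (i : Int),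
    aLoop n f i = ((PySem.List.pyRange i (i + f) 1).filter (pA n)).head? := by
  intro f
  induction f with
  | zero =>
    intro i
    rw [PySem.List.pyRange_one_eq_nil (by omega : i + ((0:Nat):Int) ≤ i)]
    rfl
  | succ f ih =>
    intro i
    have hcons : PySem.List.pyRange i (i + (f + 1 : Nat)) 1
        = i :: PySem.List.pyRange (i + 1) (i + (f + 1 : Nat)) 1 :=
      PySem.List.pyRange_one_cons (by push_cast; omega)
    have hrest : PySem.List.pyRange (i + 1) (i + (f + 1 : Nat)) 1
        = PySem.List.pyRange (i + 1) ((i + 1) + (f : Nat)) 1 := by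
      congr 1; push_cast; omega
    rw [hcons, hrest, List.filter_cons]
    by_cases hg : ¬ PySem.Int.mod n 2 = 0 ∨ ¬ PySem.Int.mod n 3 = 0
    · by_cases hs : sum_digits i = n
      · by_cases hp : is_prime i
        · have hpa : pA n i = true := by
            simp only [pA, decide_eq_true hg, hs, beq_self_eq_true, hp,
              Bool.and_self]
          rw [if_pos hpa]
          show (if _ then _ else _) = _
          rw [if_pos hg, if_pos hs, if_pos hp]
          rfl
        · have hpa : pA n i = false := by
            simp only [pA, hp, Bool.and_false]
          rw [if_neg (by simp [hpa])]
          show (if _ then _ else _) = _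
          rw [if_pos hg, if_pos hs, if_neg hp, ih (i + 1)]
      · have hpa : pA n i = false := by
          simp only [pA, beq_eq_false_iff_ne.mpr hs, Bool.and_false, Bool.false_and]
        rw [if_neg (by simp [hpa])]
        show (if _ then _ else _) = _
        rw [if_pos hg, if_neg hs, ih (i + 1)]
    · rw [if_neg (by simp [pA_guard_false n i hg])]
      show (if _ then _ else _) = _
      rw [if_neg hg, ih (i + 1)]

-- A's port equals head? of the filtered full range
lemma aPort_eq (n : Int) :
    ascending_digits_prime n
      = ((PySem.List.pyRange (aLo n) 123456790 1).filter (pA n)).head? := by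
  unfold ascending_digits_prime aLo
  rw [aLoop_eq]
  generalize hL : (10:Int) ^ ((PySem.Int.floordiv n 9).toNat) = lo
  by_cases h : lo ≤ 123456790
  · have h1 : lo + ((123456789 + 1 - lo).toNat : Int) = 123456790 := by omega
    rw [h1]
  · have h1 : lo + ((123456789 + 1 - lo).toNat : Int) = lo := by omega
    rw [h1, PySem.List.pyRange_one_eq_nil (le_refl _),
        PySem.List.pyRange_one_eq_nil (by omega)]

-- B's candidate list as filter+map over the mask range
lemma bCands_go (n : Int) : ∀ (l : List Int) (acc : List Int),
    l.foldl (fun acc mask => if (bInner mask).1 = n then acc ++ [(bInner mask).2] else acc) acc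
      = acc ++ (l.filter (fun m => (bInner m).1 == n)).map (fun m => (bInner m).2) := by
  intro l
  induction l with
  | nil => intro acc; simp
  | cons m l ih =>
    intro acc
    rw [List.foldl_cons, List.filter_cons]
    by_cases h : (bInner m).1 = n
    · rw [if_pos h, if_pos (by simp [h]), ih, List.map_cons]
      simp
    · rw [if_neg h, if_neg (by simp [h]), ih]

lemma bCands_eq (n : Int) :
    bCands n = ((PySem.List.pyRange 1 512 1).filter (fun m => (bInner m).1 == n)).map
      (fun m => (bInner m).2) := by
  unfold bCands
  rw [bCands_go n _ [], List.nil_append]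

lemma mem_bCands (n x : Int) : x ∈ bCands n ↔
    ∃ m, m ∈ PySem.List.pyRange 1 512 1 ∧ (bInner m).1 = n ∧ (bInner m).2 = x := by
  rw [bCands_eq]
  simp [List.mem_map, List.mem_filter]
  constructor
  · rintro ⟨m, ⟨hm, he⟩, hx⟩; exact ⟨m, hm, he, hx⟩
  · rintro ⟨m, hm, he, hx⟩; exact ⟨m, ⟨hm, he⟩, hx⟩

-- ---- facts about the 511 masks, checked by kernel computation ----
set_option maxRecDepth 100000 in
set_option maxHeartbeats 4000000 in
lemma maskFact : (PySem.List.pyRange 1 512 1).all (fun m =>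
    decide (sum_digits (bInner m).2 = (bInner m).1
      ∧ 1 ≤ (bInner m).2 ∧ (bInner m).2 < 123456790
      ∧ (10 ^ ((PySem.Int.floordiv (bInner m).1 9).toNat) ≤ (bInner m).2 ∨ (bInner m).2 = 9)))
    = true := by decide

set_option maxRecDepth 100000 in
set_option maxHeartbeats 4000000 in
lemma maskFact3 : (PySem.List.pyRange 1 512 1).all (fun m =>
    !(decide (PySem.Int.mod (bInner m).1 3 = 0)) || decide ((bInner m).1 = 3)
      || !(is_prime (bInner m).2)) = true := by decide

set_option maxRecDepth 100000 in
set_option maxHeartbeats 4000000 in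
lemma nodupNums : ((PySem.List.pyRange 1 512 1).map (fun m => (bInner m).2)).Nodup := by decide

lemma isPrime9 : is_prime 9 = false := by decide

set_option maxRecDepth 100000 in
set_option maxHeartbeats 4000000 in
lemma bInner_single : (PySem.List.pyRange 1 10 1).all (fun c =>
    decide (bInner (2 ^ ((c - 1).toNat)) = (c, c))) = true := by decide

set_option maxRecDepth 100000 in
set_option maxHeartbeats 4000000 in
lemma bInner_add : (PySem.List.pyRange 1 10 1).all (fun c =>
    (PySem.List.pyRange 1 (2 ^ ((c - 1).toNat)) 1).all (fun m =>
      decide (bInner (m + 2 ^ ((c - 1).toNat))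
        = ((bInner m).1 + c, (bInner m).2 * 10 + c)))) = true := by decide

-- fuel irrelevance for the sum_digits loop
lemma sdGo_fuel : ∀ (k : Nat) (n : Int), n.toNat ≤ k → ∀ (f₁ f₂ : Nat) (prev res : Int),
    n.toNat < f₁ → n.toNat < f₂ →
    pySumDigitsGo f₁ prev res n = pySumDigitsGo f₂ prev res n := by
  intro k
  induction k with
  | zero =>
    intro n hn f₁ f₂ prev res h1 h2
    match f₁, f₂ with
    | g₁ + 1, g₂ + 1 =>
      have : ¬ 0 < n := by omega
      simp [pySumDigitsGo, this]
  | succ k ih =>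
    intro n hn f₁ f₂ prev res h1 h2
    match f₁, f₂ with
    | g₁ + 1, g₂ + 1 =>
      by_cases hpos : 0 < n
      · have hdiv : PySem.Int.floordiv n 10 = n / 10 :=
          PySem.Int.floordiv_eq_ediv_of_pos (by norm_num)
        have hlt : (n / 10).toNat ≤ k := by omega
        simp only [pySumDigitsGo, if_pos hpos]
        split
        · rfl
        · rw [hdiv]
          exact ih (n / 10) hlt _ _ _ _ (by omega) (by omega)
      · simp [pySumDigitsGo, hpos]

-- the degenerate prev = 0 case of the loop always fails
lemma sdGo_zero (f : Nat) (res j : Int) (hj : 1 ≤ j) (hf : 0 < f) :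
    pySumDigitsGo f 0 res j = -1 := by
  match f with
  | g + 1 =>
    have hm : 0 ≤ PySem.Int.mod j 10 := by
      rw [PySem.Int.mod_eq_emod_of_pos (by norm_num)]; omega
    simp only [pySumDigitsGo, if_pos (show 0 < j by omega)]
    rw [if_pos hm]

-- helpers extracting the kernel-checked mask facts
lemma maskFact' (m : Int) (hm : m ∈ PySem.List.pyRange 1 512 1) :
    sum_digits (bInner m).2 = (bInner m).1 ∧ 1 ≤ (bInner m).2 ∧ (bInner m).2 < 123456790 ∧
    (10 ^ ((PySem.Int.floordiv (bInner m).1 9).toNat) ≤ (bInner m).2 ∨ (bInner m).2 = 9) :=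
  of_decide_eq_true (List.all_eq_true.mp maskFact m hm)

lemma maskFact3' (m : Int) (hm : m ∈ PySem.List.pyRange 1 512 1)
    (h3 : PySem.Int.mod (bInner m).1 3 = 0) (hne : (bInner m).1 ≠ 3) :
    is_prime (bInner m).2 = false := by
  have h := List.all_eq_true.mp maskFact3 m hm
  simp only [Bool.or_eq_true, Bool.not_eq_true', decide_eq_true_eq, decide_eq_false_iff_not] at h
  rcases h with (h | h) | h
  · exact absurd h3 h
  · exact absurd h hne
  · exact h

lemma bInner_single' (c : Int) (h1 : 1 ≤ c) (h9 : c ≤ 9) :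
    bInner (2 ^ ((c - 1).toNat)) = (c, c) :=
  of_decide_eq_true (List.all_eq_true.mp bInner_single c
    (PySem.List.mem_pyRange_one.mpr ⟨h1, by omega⟩))

lemma bInner_add' (c m : Int) (h1 : 1 ≤ c) (h9 : c ≤ 9) (hm1 : 1 ≤ m)
    (hm2 : m < 2 ^ ((c - 1).toNat)) :
    bInner (m + 2 ^ ((c - 1).toNat)) = ((bInner m).1 + c, (bInner m).2 * 10 + c) :=
  of_decide_eq_true (List.all_eq_true.mp
    (List.all_eq_true.mp bInner_add c (PySem.List.mem_pyRange_one.mpr ⟨h1, by omega⟩))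
    m (PySem.List.mem_pyRange_one.mpr ⟨hm1, hm2⟩))

lemma bCands_nodup (n : Int) : (bCands n).Nodup := by
  rw [bCands_eq]
  exact List.Nodup.sublist (List.Sublist.map _ List.filter_sublist) nodupNums

lemma sdGo_done (f : Nat) (p r : Int) : pySumDigitsGo f p r 0 = r := by
  cases f <;> simp [pySumDigitsGo]

-- completeness: a successful sum_digits run exhibits a digit-subset mask
lemma sd_complete : ∀ (k : Nat) (i prev res : Int), i.toNat ≤ k → 1 ≤ i →
    1 ≤ prev → prev ≤ 10 → 0 ≤ res →
    0 ≤ pySumDigitsGo (i.toNat + 1) prev res i →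
    ∃ m : Int, 1 ≤ m ∧ m < 2 ^ ((prev - 1).toNat) ∧ (bInner m).2 = i
      ∧ (bInner m).1 = pySumDigitsGo (i.toNat + 1) prev res i - res := by
  intro k
  induction k with
  | zero => intro i prev res hk h1; omega
  | succ k ih =>
    intro i prev res hk h1 hp1 hp10 hres hsucc
    have hmod : PySem.Int.mod i 10 = i % 10 := PySem.Int.mod_eq_emod_of_pos (by norm_num)
    have hdiv : PySem.Int.floordiv i 10 = i / 10 := PySem.Int.floordiv_eq_ediv_of_pos (by norm_num)
    have hstep : pySumDigitsGo (i.toNat + 1) prev res i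
        = if prev ≤ i % 10 then -1
          else pySumDigitsGo i.toNat (i % 10) (res + i % 10) (i / 10) := by
      simp only [pySumDigitsGo, if_pos (show 0 < i by omega), hmod, hdiv]
    have hc0 : 0 ≤ i % 10 ∧ i % 10 ≤ 9 := by omega
    by_cases hpc : prev ≤ i % 10
    · rw [hstep, if_pos hpc] at hsucc; omega
    · rw [hstep, if_neg hpc] at hsucc ⊢
      by_cases hj : i / 10 = 0
      · have hci : i % 10 = i := by omega
        rw [hj, sdGo_done] at hsucc ⊢
        refine ⟨2 ^ ((i % 10 - 1).toNat), ?_, ?_, ?_, ?_⟩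
        · have := pow_pos (show (0:Int) < 2 by norm_num) ((i % 10 - 1).toNat); omega
        · exact pow_lt_pow_right₀ (by norm_num) (by omega)
        · rw [bInner_single' (i % 10) (by omega) (by omega)]; exact hci
        · rw [bInner_single' (i % 10) (by omega) (by omega)]; omega
      · have hjo : 1 ≤ i / 10 := by omega
        have hcz : 1 ≤ i % 10 := by
          by_contra hcz
          have hc : i % 10 = 0 := by omega
          rw [hc, add_zero, sdGo_zero i.toNat res (i / 10) hjo (by omega)] at hsucc
          omega
        have hstab : pySumDigitsGo i.toNat (i % 10) (res + i % 10) (i / 10)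
            = pySumDigitsGo ((i / 10).toNat + 1) (i % 10) (res + i % 10) (i / 10) :=
          sdGo_fuel (i / 10).toNat (i / 10) (le_refl _) _ _ _ _ (by omega) (by omega)
        rw [hstab] at hsucc ⊢
        obtain ⟨m', hm1, hm2, hmv, hms⟩ :=
          ih (i / 10) (i % 10) (res + i % 10) (by omega) hjo hcz (by omega) (by omega) hsucc
        have hadd := bInner_add' (i % 10) m' hcz (by omega) hm1 hm2
        refine ⟨m' + 2 ^ ((i % 10 - 1).toNat), by
            have := pow_pos (show (0:Int) < 2 by norm_num) ((i % 10 - 1).toNat); omega,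
          ?_, ?_, ?_⟩
        · have h2c : m' + 2 ^ ((i % 10 - 1).toNat) < 2 ^ ((i % 10 - 1).toNat + 1) := by
            rw [pow_succ]; omega
          refine lt_of_lt_of_le h2c (pow_le_pow_right₀ (by norm_num) (by omega))
        · rw [hadd, hmv]; simp only; omega
        · rw [hadd, hms]; simp only; omega

-- membership bridge between the two filtered lists (guard case)
lemma mem_bridge (n i : Int) (hn : 0 ≤ n)
    (hg : ¬ PySem.Int.mod n 2 = 0 ∨ ¬ PySem.Int.mod n 3 = 0) :
    (i ∈ PySem.List.pyRange (aLo n) 123456790 1 ∧ pA n i = true) ↔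
    (i ∈ PySem.List.sorted (bCands n) (fun x => x) false ∧ is_prime i = true) := by
  constructor
  · rintro ⟨hmem, hpa⟩
    simp only [pA, Bool.and_eq_true, beq_iff_eq, decide_eq_true_eq] at hpa
    obtain ⟨⟨-, hs⟩, hp⟩ := hpa
    refine ⟨?_, hp⟩
    obtain ⟨hlo, hhi⟩ := PySem.List.mem_pyRange_one.mp hmem
    have h1 : 1 ≤ i := by
      have := pow_pos (show (0:Int) < 10 by norm_num) ((PySem.Int.floordiv n 9).toNat)
      unfold aLo at hlo; omega
    unfold sum_digits at hs
    obtain ⟨m, hm1, hm2, hmv, hms⟩ := sd_complete i.toNat i 10 0 (le_refl _) h1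
      (by norm_num) (le_refl _) (le_refl _) (by omega)
    rw [PySem.List.mem_sorted, mem_bCands]
    refine ⟨m, PySem.List.mem_pyRange_one.mpr ⟨hm1, by
      have h9 : ((10:Int) - 1).toNat = 9 := rfl
      rw [h9] at hm2; norm_num at hm2; omega⟩, ?_, hmv⟩
    omega
  · rintro ⟨hmem, hp⟩
    rw [PySem.List.mem_sorted, mem_bCands] at hmem
    obtain ⟨m, hm, hs, hv⟩ := hmem
    obtain ⟨hsum, h1, hhi, hlo⟩ := maskFact' m hm
    rcases hlo with hlo | h9
    · refine ⟨PySem.List.mem_pyRange_one.mpr ⟨by rw [← hv]; unfold aLo; rw [← hs]; exact hlo,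
        by omega⟩, ?_⟩
      simp only [pA, Bool.and_eq_true, beq_iff_eq, decide_eq_true_eq]
      exact ⟨⟨hg, by rw [← hv, hsum, hs]⟩, hp⟩
    · rw [← hv, h9, isPrime9] at hp
      exact absurd hp (by simp)

-- two strictly increasing integer lists with the same members are equal
lemma eq_of_pairwise_lt (l₁ l₂ : List Int) (h₁ : l₁.Pairwise (· < ·))
    (h₂ : l₂.Pairwise (· < ·)) (hm : ∀ x, x ∈ l₁ ↔ x ∈ l₂) : l₁ = l₂ := by
  have hn₁ : l₁.Nodup := h₁.imp (fun h => ne_of_lt h)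
  have hn₂ : l₂.Nodup := h₂.imp (fun h => ne_of_lt h)
  have hp : l₁.Perm l₂ := (List.perm_ext_iff_of_nodup hn₁ hn₂).mpr hm
  exact hp.eq_of_pairwise
    (fun a b _ _ hab hba => absurd hba (not_lt.mpr (le_of_lt hab))) h₁ h₂

-- ===== VERDICT (by name: the statement is the Claim_ definition above) =====
theorem ascending_digits_prime_spec : Claim_equal_ascending_digits_prime := by
  intro n _ hpre
  unfold Spec_ascending_digits_prime
  rw [aPort_eq]
  unfold ascending_digits_prime_alt
  rw [bFind_eq]
  by_cases hg : ¬ PySem.Int.mod n 2 = 0 ∨ ¬ PySem.Int.mod n 3 = 0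
  · have hp1 : ((PySem.List.pyRange (aLo n) 123456790 1).filter (pA n)).Pairwise (· < ·) :=
      (PySem.List.pairwise_lt_pyRange_one (a := aLo n) (b := 123456790)).filter _
    have hle : (PySem.List.sorted (bCands n) (fun x => x) false).Pairwise (· ≤ ·) :=
      PySem.List.sorted_pairwise _ _
    have hnd : (PySem.List.sorted (bCands n) (fun x => x) false).Nodup :=
      ((PySem.List.sorted_perm (bCands n) (fun x => x) false).symm).nodup (bCands_nodup n)
    have hp2 : ((PySem.List.sorted (bCands n) (fun x => x) false).filter
        (fun x => is_prime x)).Pairwise (· < ·) :=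
      ((hle.and hnd).imp (fun h => lt_of_le_of_ne h.1 h.2)).filter _
    have hmm : ∀ x, x ∈ (PySem.List.pyRange (aLo n) 123456790 1).filter (pA n) ↔
        x ∈ (PySem.List.sorted (bCands n) (fun x => x) false).filter (fun x => is_prime x) := by
      intro x
      rw [List.mem_filter, List.mem_filter]
      exact mem_bridge n x hpre hg
    rw [eq_of_pairwise_lt _ _ hp1 hp2 hmm]
  · have hA : (PySem.List.pyRange (aLo n) 123456790 1).filter (pA n) = [] :=
      List.filter_eq_nil_iff.mpr (fun x _ => by simp [pA_guard_false n x hg])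
    have hB : (PySem.List.sorted (bCands n) (fun x => x) false).filter
        (fun x => is_prime x) = [] := by
      refine List.filter_eq_nil_iff.mpr (fun x hx => ?_)
      rw [PySem.List.mem_sorted, mem_bCands] at hx
      obtain ⟨m, hm, hs, hv⟩ := hx
      simp only [not_or, not_not] at hg
      have hm2 : PySem.Int.mod n 2 = n % 2 := PySem.Int.mod_eq_emod_of_pos (by norm_num)
      have hm3 : PySem.Int.mod n 3 = n % 3 := PySem.Int.mod_eq_emod_of_pos (by norm_num)
      have hne3 : (bInner m).1 ≠ 3 := by rw [hs]; omega
      have := maskFact3' m hm (by rw [hs]; exact hg.2) hne3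
      rw [hv] at this
      simp [this]
    rw [hA, hB]
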